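-- pv_equiv track=rewrite | github.com/sublimeS0/advent-of-code | 2024/day9/day9p2.py | find_open_space
-- ===== SOURCE A (Python) =====
-- def find_open_space(disk_map, size):
--     """
--     Finds a subarray of periods of length `size`, if it exists
--     :param disk_map: Map to search for open space
--     :param size: Size of required open space
--     :return: Index of start of open space, -1 otherwise
--
--     :cite: https://stackoverflow.com/a/17870684/22181934 - Algorithm to find first index of sublist given list and
--     sublist
--     """
--     l = disk_map
--     sl = list(size * '.')
--
--     sll = len(sl)
--     for ind in (i for i, e in enumerate(l) if e == sl[0]):
--         if l[ind:ind + sll] == sl: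
--             return ind
--
--     return -1
-- ===== SOURCE B (Python) =====
-- def find_open_space(disk_map, size):
--     """Single left-to-right pass tracking the length of the current run of '.'."""
--     run = 0
--     for i, e in enumerate(disk_map):
--         if e == '.':
--             run += 1
--             if run == size:
--                 return i - size + 1
--         else:
--             run = 0
--     return -1
-- ===== Notes on version B (the rewrite author's own statement) =====
-- stated objective: faster
-- what changed: Replaced the build-a-sublist-and-compare-a-slice-at-every-dot search with a single pass that tracks the length of the current run of '.', removing the O(size) slice comparison per candidate index and the materialised list of size dots.
import Mathlib
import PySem

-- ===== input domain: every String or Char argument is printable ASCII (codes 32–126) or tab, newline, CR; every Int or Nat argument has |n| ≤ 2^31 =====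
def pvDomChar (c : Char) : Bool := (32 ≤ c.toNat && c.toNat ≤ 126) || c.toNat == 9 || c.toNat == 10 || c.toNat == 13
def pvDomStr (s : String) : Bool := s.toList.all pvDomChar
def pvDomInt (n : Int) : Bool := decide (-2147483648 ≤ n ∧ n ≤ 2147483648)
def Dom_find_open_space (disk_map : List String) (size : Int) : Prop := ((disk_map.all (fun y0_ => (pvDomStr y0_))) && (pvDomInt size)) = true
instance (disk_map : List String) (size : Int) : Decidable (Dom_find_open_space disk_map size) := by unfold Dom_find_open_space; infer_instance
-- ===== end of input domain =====

-- B replaces A's slice-comparison-at-every-dot search by a single pass tracking the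
-- current run of '.' (objective: faster, one O(n) pass instead of O(n*size) slice checks).


-- ===== PORT A =====
-- the for-loop over the filtering generator '(i for i, e in enumerate(l) if e == sl[0])'
-- with the early 'return ind', as an index-carrying recursion over l
def find_open_space_goA (l sl : List String) (sll : Nat) : Nat → List String → Int
  | _, [] => -1
  | i, e :: rest =>
    -- 'e == sl[0]' ; sl[0] raises IndexError when sl = [] — excluded by Pre_, default ""
    if e = (PySem.List.pyGet? sl 0).getD "" then
      -- 'l[ind:ind + sll] == sl'
      if PySem.List.slice l (some (i : Int)) (some ((i : Int) + (sll : Int))) = sl then (i : Int)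
      else find_open_space_goA l sl sll (i + 1) rest
    else find_open_space_goA l sl sll (i + 1) rest

def find_open_space (disk_map : List String) (size : Int) : Int :=
  let l := disk_map
  let sl := List.replicate size.toNat "."   -- list(size * '.')
  let sll := sl.length
  find_open_space_goA l sl sll 0 l

-- ===== PORT B =====
-- single pass tracking the current run of "." (i, run as in Source B)
def find_open_space_goB (size : Int) : List String → Int → Int → Int
  | [], _, _ => -1
  | e :: rest, i, run =>
    if e = "." then
      if run + 1 = size then i - size + 1
      else find_open_space_goB size rest (i + 1) (run + 1)
    else find_open_space_goB size rest (i + 1) 0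

def find_open_space_alt (disk_map : List String) (size : Int) : Int :=
  find_open_space_goB size disk_map 0 0

-- ===== PRECONDITION & SPEC =====
-- A raises IndexError (sl[0] with sl = []) exactly when disk_map is non-empty and size ≤ 0.
def Pre_find_open_space (disk_map : List String) (size : Int) : Prop :=
  disk_map = [] ∨ 1 ≤ size
instance (disk_map : List String) (size : Int) : Decidable (Pre_find_open_space disk_map size) := by unfold Pre_find_open_space; infer_instance

def pvWitness_find_open_space : List String × Int := ([".", "a", ".", "."], 2)

def Spec_find_open_space (disk_map : List String) (size : Int) (out : Int) : Prop := out = find_open_space_alt disk_map size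
instance (disk_map : List String) (size : Int) (out : Int) : Decidable (Spec_find_open_space disk_map size out) := by unfold Spec_find_open_space; infer_instance

-- ===== CLAIM (what is proved, stated in full; the proofs are below) =====
def Claim_equal_find_open_space : Prop := ∀ (disk_map : List String) (size : Int), Dom_find_open_space disk_map size → Pre_find_open_space disk_map size → Spec_find_open_space disk_map size (find_open_space disk_map size)

-- ===== LEMMAS AND PROOFS =====

-- first index whose next s elements are all "." (the common specification of both searches)
def fi? (s : Nat) : List String → Option Nat
  | [] => none
  | e :: rest =>
    if (e :: rest).take s = List.replicate s "." then some 0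
    else (fi? s rest).map (· + 1)

theorem take_prefix_replicate {xs : List String} {m s : Nat} (hm : m ≤ s)
    (h : xs.take s = List.replicate s ".") : xs.take m = List.replicate m "." := by
  have : xs.take m = (xs.take s).take m := by
    rw [List.take_take]; congr 1; omega
  rw [this, h, List.take_replicate]; congr 1; omega

theorem head_of_take_replicate {e : String} {xs : List String} {s : Nat} (hs : 1 ≤ s)
    (h : (e :: xs).take s = List.replicate s ".") : e = "." := by
  obtain ⟨k, rfl⟩ : ∃ k, s = k + 1 := ⟨s - 1, by omega⟩
  simp [List.take_succ_cons, List.replicate_succ] at h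
  exact h.1

theorem fi?_zero {xs : List String} {s : Nat} (hs : 1 ≤ s)
    (h : xs.take s = List.replicate s ".") : fi? s xs = some 0 := by
  cases xs with
  | nil => simp at h; omega
  | cons e rest => simp [fi?, h]

theorem goA_eq_fi? {s : Nat} (hs : 1 ≤ s) (l : List String) :
    ∀ (rest : List String) (i : Nat), rest = l.drop i →
      find_open_space_goA l (List.replicate s ".") s i rest =
        (match fi? s rest with | none => -1 | some r => ((i + r : Nat) : Int)) := by
  intro rest
  induction rest with
  | nil => intro i _; simp [find_open_space_goA, fi?]
  | cons e rest' ih =>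
    intro i hdrop
    have hhead : (PySem.List.pyGet? (List.replicate s ".") 0).getD "" = "." := by
      obtain ⟨k, rfl⟩ : ∃ k, s = k + 1 := ⟨s - 1, by omega⟩
      simp [List.replicate_succ]
    have hslice : PySem.List.slice l (some (i : Int)) (some ((i : Int) + (s : Int))) =
        (e :: rest').take s := by
      rw [PySem.List.slice_natCast_add, ← hdrop]
    have hdrop' : rest' = l.drop (i + 1) := by
      have := congrArg List.tail hdrop
      simpa [List.tail_drop] using this
    by_cases hC : (e :: rest').take s = List.replicate s "."
    · have he : e = "." := head_of_take_replicate hs hC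
      subst he
      simp [find_open_space_goA, hhead, hslice, hC, fi?]
    · have hrec : find_open_space_goA l (List.replicate s ".") s i (e :: rest') =
          find_open_space_goA l (List.replicate s ".") s (i + 1) rest' := by
        by_cases he : e = "."
        · subst he
          simp [find_open_space_goA, hhead, hslice, if_neg hC]
        · simp [find_open_space_goA, hhead, he]
      rw [hrec, ih (i + 1) hdrop']
      have : fi? s (e :: rest') = (fi? s rest').map (· + 1) := by
        simp [fi?, hC]
      rw [this]
      cases fi? s rest' with
      | none => simp
      | some r => simp; ring

theorem goB_eq_fi? {s : Nat} (hs : 1 ≤ s) :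
    ∀ (rest : List String) (i run : Nat), run < s →
      find_open_space_goB (s : Int) rest (i : Int) (run : Int) =
        (if rest.take (s - run) = List.replicate (s - run) "." then ((i : Int) - (run : Int))
         else match fi? s rest with | none => -1 | some r => ((i + r : Nat) : Int)) := by
  intro rest
  induction rest with
  | nil =>
    intro i run hr
    have : ¬ (([] : List String).take (s - run) = List.replicate (s - run) ".") := by
      obtain ⟨k, hk⟩ : ∃ k, s - run = k + 1 := ⟨s - run - 1, by omega⟩
      simp [hk, List.replicate_succ]
    simp [find_open_space_goB, fi?]
    omega
  | cons e rest' ih =>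
    intro i run hr
    by_cases he : e = "."
    · subst he
      by_cases hfull : run + 1 = s
      · have hcond : (("." : String) :: rest').take (s - run) = List.replicate (s - run) "." := by
          have h1 : s - run = 1 := by omega
          simp [h1]
        have hint : (run : Int) + 1 = (s : Int) := by omega
        simp [find_open_space_goB, hint, hcond]
        omega
      · have hint : ¬ ((run : Int) + 1 = (s : Int)) := by omega
        have hstep : find_open_space_goB (s : Int) (("." : String) :: rest') (i : Int) (run : Int) =
            find_open_space_goB (s : Int) rest' ((i : Int) + 1) ((run : Int) + 1) := by
          simp [find_open_space_goB, hint]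
        have hcast : ((i : Int) + 1) = ((i + 1 : Nat) : Int) ∧ ((run : Int) + 1) = ((run + 1 : Nat) : Int) := by
          constructor <;> push_cast <;> ring
        rw [hstep, hcast.1, hcast.2, ih (i + 1) (run + 1) (by omega)]
        have hsub : s - run = (s - (run + 1)) + 1 := by omega
        have hcondiff : ((("." : String) :: rest').take (s - run) = List.replicate (s - run) ".") ↔
            (rest'.take (s - (run + 1)) = List.replicate (s - (run + 1)) ".") := by
          rw [hsub]
          simp [List.take_succ_cons, List.replicate_succ]
        by_cases hC : rest'.take (s - (run + 1)) = List.replicate (s - (run + 1)) "."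
        · rw [if_pos hC, if_pos (hcondiff.mpr hC)]
          push_cast
          ring
        · rw [if_neg hC, if_neg (fun h => hC (hcondiff.mp h))]
          have hnotfull : ¬ ((("." : String) :: rest').take s = List.replicate s ".") := by
            intro h
            exact (hcondiff.mp (take_prefix_replicate (by omega) h)) |> hC
          have : fi? s (("." : String) :: rest') = (fi? s rest').map (· + 1) := by
            simp [fi?, hnotfull]
          rw [this]
          cases fi? s rest' with
          | none => simp
          | some r => simp; ring
    · have hstep : find_open_space_goB (s : Int) (e :: rest') (i : Int) (run : Int) =
          find_open_space_goB (s : Int) rest' ((i : Int) + 1) (0 : Int) := by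
        simp [find_open_space_goB, he]
      have hcast : ((i : Int) + 1) = ((i + 1 : Nat) : Int) := by push_cast; ring
      have h0 : ((0 : Nat) : Int) = (0 : Int) := by norm_num
      rw [hstep, hcast, ← h0, ih (i + 1) 0 (by omega)]
      have hcond : ¬ ((e :: rest').take (s - run) = List.replicate (s - run) ".") := by
        intro h
        exact he (head_of_take_replicate (by omega) h)
      have hnotfull : ¬ ((e :: rest').take s = List.replicate s ".") := by
        intro h
        exact he (head_of_take_replicate hs h)
      have hfi : fi? s (e :: rest') = (fi? s rest').map (· + 1) := by
        simp [fi?, hnotfull]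
      rw [if_neg hcond, hfi]
      by_cases hC : rest'.take (s - 0) = List.replicate (s - 0) "."
      · rw [if_pos hC]
        have : fi? s rest' = some 0 := fi?_zero hs (by simpa using hC)
        simp [this]
      · rw [if_neg hC]
        cases fi? s rest' with
        | none => simp
        | some r => simp; ring

-- ===== VERDICT (by name: the statement is the Claim_ definition above) =====
theorem find_open_space_spec : Claim_equal_find_open_space := by
  intro disk_map size _ hpre
  unfold Spec_find_open_space find_open_space find_open_space_alt
  rcases hpre with hnil | hsz
  · subst hnil
    simp [find_open_space_goA, find_open_space_goB]
  · set s := size.toNat with hsdef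
    have hs : 1 ≤ s := by omega
    have hsize : ((s : Nat) : Int) = size := by omega
    have hA := goA_eq_fi? hs disk_map disk_map 0 (by simp)
    have hB := goB_eq_fi? hs disk_map 0 0 (by omega)
    simp only [Nat.cast_zero] at hB
    simp only [List.length_replicate]
    rw [hA, ← hsize, hB]
    by_cases hC : disk_map.take s = List.replicate s "."
    · rw [if_pos (by simpa using hC)]
      have : fi? s disk_map = some 0 := fi?_zero hs hC
      simp [this]
    · rw [if_neg (by simpa using hC)]
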